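-- pv_equiv track=rewrite | github.com/daniel-reich/turbo-robot | PGqy3SRaobbtFfspW_18.py | simple_pair
-- ===== SOURCE A (Python) =====
-- def simple_pair(lst, n):
--   for i in range(len(lst)):
--     #lst2 = lst[i+1:]
--     for j in lst[i+1:]:
--       first = lst[i]
--       second = j
--       if check_multiply(first,second,n) == 1:
--         return [first,second]
--   return None
--
-- def check_multiply(x,y,n):
--   if x*y == n:
--     return 1
--   else:
--     return 0
-- ===== SOURCE B (Python) =====
-- def simple_pair(lst, n):
--     # One right-to-left pass: 'seen' holds the set of values strictly to the
--     # right of i; the last (leftmost) index with a partner wins.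
--     seen = set()
--     ans = None
--     for i in range(len(lst) - 1, -1, -1):
--         x = lst[i]
--         if x == 0:
--             if n == 0 and i + 1 < len(lst):
--                 ans = [0, lst[i + 1]]
--         elif n % x == 0 and n // x in seen:
--             ans = [x, n // x]
--         seen.add(x)
--     return ans
-- ===== Notes on version B (the rewrite author's own statement) =====
-- stated objective: faster
-- what changed: Replaced the quadratic scan of all later elements for every position by a single right-to-left pass that maintains a set of already-seen (later) values and checks divisibility, overwriting the answer so the leftmost matching position wins.
import Mathlib
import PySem

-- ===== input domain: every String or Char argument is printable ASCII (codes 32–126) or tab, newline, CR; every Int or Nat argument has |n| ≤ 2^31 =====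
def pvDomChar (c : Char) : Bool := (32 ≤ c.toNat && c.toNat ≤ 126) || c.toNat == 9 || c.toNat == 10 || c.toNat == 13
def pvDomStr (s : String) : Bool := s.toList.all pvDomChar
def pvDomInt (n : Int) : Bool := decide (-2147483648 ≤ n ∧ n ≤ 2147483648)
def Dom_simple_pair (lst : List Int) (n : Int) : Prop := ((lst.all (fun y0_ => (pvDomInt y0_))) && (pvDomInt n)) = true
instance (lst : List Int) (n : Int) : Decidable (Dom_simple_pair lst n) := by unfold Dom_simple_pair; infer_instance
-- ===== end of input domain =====

-- B replaces A's quadratic nested scan by one right-to-left pass with a set of later values (objective: faster, O(n)).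

-- ===== PORT A =====
def check_multiply (x y n : Int) : Int := if x * y = n then 1 else 0

-- inner loop 'for j in lst[i+1:]': s is the tail after position i
def simplePairInner (first n : Int) : List Int → Option (List Int)
  | [] => none
  | j :: rest =>
    if check_multiply first j n = 1 then some [first, j] else simplePairInner first n rest

-- outer loop 'for i in range(len(lst))': each step sees lst[i] and its tail lst[i+1:]
def simplePairOuter (n : Int) : List Int → Option (List Int)
  | [] => none
  | x :: rest =>
    match simplePairInner x n rest with
    | some r => some r
    | none => simplePairOuter n rest

def simple_pair (lst : List Int) (n : Int) : Option (List Int) := simplePairOuter n lst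

-- ===== PORT B =====
-- loop body of Source B over the descending index list range(len(lst)-1, -1, -1)
def simplePairAltLoop (lst : List Int) (n : Int) :
    List Nat → PySem.Set Int → Option (List Int) → Option (List Int)
  | [], _, ans => ans
  | i :: is, seen, ans =>
    let x := lst.getD i 0          -- lst[i]; i < len(lst) by construction of the index list
    let ans' :=
      if x = 0 then
        (if n = 0 ∧ i + 1 < lst.length then some [0, lst.getD (i+1) 0] else ans)
      else if PySem.Int.mod n x = 0 ∧ PySem.Int.floordiv n x ∈ seen then
        some [x, PySem.Int.floordiv n x]
      else ans
    simplePairAltLoop lst n is (PySem.Set.add seen x) ans'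

def simple_pair_alt (lst : List Int) (n : Int) : Option (List Int) :=
  -- range(len(lst)-1, -1, -1) = [len-1, …, 0] = (List.range lst.length).reverse
  simplePairAltLoop lst n (List.range lst.length).reverse PySem.Set.empty none

-- ===== PRECONDITION & SPEC =====
def Spec_simple_pair (lst : List Int) (n : Int) (out : Option (List Int)) : Prop := out = simple_pair_alt lst n
instance (lst : List Int) (n : Int) (out : Option (List Int)) : Decidable (Spec_simple_pair lst n out) := by unfold Spec_simple_pair; infer_instance

-- ===== CLAIM (what is proved, stated in full; the proofs are below) =====
def Claim_equal_simple_pair : Prop := ∀ (lst : List Int) (n : Int), Dom_simple_pair lst n → Spec_simple_pair lst n (simple_pair lst n)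

-- ===== LEMMAS AND PROOFS =====

-- the pair produced at index i, if index i has a later partner; shared characterisation of both programs
def pairHit (lst : List Int) (n : Int) (i : Nat) : Option (List Int) :=
  let x := lst.getD i 0
  if x = 0 then
    (if n = 0 ∧ i + 1 < lst.length then some [0, lst.getD (i+1) 0] else none)
  else if PySem.Int.mod n x = 0 ∧ PySem.Int.floordiv n x ∈ lst.drop (i+1) then
    some [x, PySem.Int.floordiv n x]
  else none

-- exact-division bridge: for x ≠ 0,  x*j = n  ↔  n % x == 0 and n // x == j
theorem mul_eq_iff_div (x j n : Int) (hx : x ≠ 0) :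
    x * j = n ↔ (PySem.Int.mod n x = 0 ∧ PySem.Int.floordiv n x = j) := by
  constructor
  · rintro rfl
    have hm : PySem.Int.mod (x * j) x = 0 :=
      (PySem.Int.mod_eq_zero_iff_dvd _ _).mpr (dvd_mul_right x j)
    refine ⟨hm, ?_⟩
    have h := PySem.Int.floordiv_mul_add_mod (x * j) x
    rw [hm, add_zero] at h
    have h2 : (PySem.Int.floordiv (x * j) x) * x = j * x := by rw [h]; ring
    exact mul_right_cancel₀ hx h2
  · rintro ⟨hm, rfl⟩
    have h := PySem.Int.floordiv_mul_add_mod n x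
    rw [hm, add_zero] at h
    rw [mul_comm] at h
    exact h

theorem inner_char (x n : Int) (s : List Int) :
    simplePairInner x n s =
      (if x = 0 then (if n = 0 ∧ s ≠ [] then some [x, s.headD 0] else none)
       else if PySem.Int.mod n x = 0 ∧ PySem.Int.floordiv n x ∈ s then
         some [x, PySem.Int.floordiv n x]
       else none) := by
  induction s with
  | nil => by_cases hx : x = 0 <;> simp [simplePairInner, hx]
  | cons j rest ih =>
    by_cases hx : x = 0
    · subst hx
      by_cases hn : n = 0
      · subst hn
        simp [simplePairInner, check_multiply]
      · have h0 : (0:Int) ≠ n := Ne.symm hn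
        simp [simplePairInner, check_multiply, h0, hn, ih]
    · by_cases hmul : x * j = n
      · obtain ⟨hm, hd⟩ := (mul_eq_iff_div x j n hx).mp hmul
        simp [simplePairInner, check_multiply, hmul, hx, hm, hd]
      · have hne : ¬ (PySem.Int.mod n x = 0 ∧ PySem.Int.floordiv n x = j) :=
          fun h => hmul ((mul_eq_iff_div x j n hx).mpr h)
        simp only [simplePairInner, check_multiply, hmul, ih, hx]
        by_cases hm : PySem.Int.mod n x = 0
        · have hdj : PySem.Int.floordiv n x ≠ j := fun h => hne ⟨hm, h⟩
          simp [hm, List.mem_cons, hdj]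
        · simp [hm]

theorem outer_char (lst : List Int) (n : Int) :
    ∀ k, k ≤ lst.length →
      simplePairOuter n (lst.drop k) =
        (List.range' k (lst.length - k)).findSome? (pairHit lst n) := by
  intro k hk
  induction h : lst.length - k generalizing k with
  | zero =>
    have hkl : k = lst.length := by omega
    subst hkl
    simp [simplePairOuter, List.drop_length]
  | succ m ih =>
    have hklt : k < lst.length := by omega
    have hdrop : lst.drop k = lst[k] :: lst.drop (k+1) := List.drop_eq_getElem_cons hklt
    have hget : lst.getD k 0 = lst[k] := List.getD_eq_getElem lst 0 hklt
    have hinner : simplePairInner lst[k] n (lst.drop (k+1)) = pairHit lst n k := by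
      rw [inner_char]
      unfold pairHit
      rw [hget]
      by_cases hx : lst[k] = 0
      · by_cases hn : n = 0
        · by_cases hl : k + 1 < lst.length
          · have hne : lst.drop (k+1) ≠ [] := by
              rw [← List.length_pos_iff_ne_nil, List.length_drop]; omega
            simp [hx, hn, hl, hne]
          · have hne : lst.drop (k+1) = [] := by
              rw [List.drop_eq_nil_iff]; omega
            simp [hx, hn, hl, hne]
        · simp [hx, hn]
      · simp [hx]
    rw [hdrop, List.range'_succ, List.findSome?_cons]
    simp only [simplePairOuter]
    rw [hinner]
    cases hh : pairHit lst n k with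
    | some r => simp
    | none =>
      simp only
      have hm : lst.length - (k+1) = m := by omega
      rw [ih (k+1) (by omega) hm]

theorem alt_loop_char (lst : List Int) (n : Int) :
    ∀ k, k ≤ lst.length → ∀ (seen : PySem.Set Int) (ans : Option (List Int)),
      (∀ v : Int, v ∈ seen ↔ v ∈ lst.drop k) →
      simplePairAltLoop lst n (List.range k).reverse seen ans =
        ((List.range k).findSome? (pairHit lst n)).or ans := by
  intro k
  induction k with
  | zero => intro _ seen ans _; simp [simplePairAltLoop]
  | succ k ih =>
    intro hk seen ans hseen
    have hklt : k < lst.length := by omega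
    have hrev : (List.range (k+1)).reverse = k :: (List.range k).reverse := by
      rw [List.range_succ, List.reverse_append]; rfl
    have hget : lst.getD k 0 = lst[k] := List.getD_eq_getElem lst 0 hklt
    have hdrop : lst.drop k = lst[k] :: lst.drop (k+1) := List.drop_eq_getElem_cons hklt
    -- the updated answer at index k is exactly (pairHit lst n k).or ans
    have hans' :
        (if lst.getD k 0 = 0 then
          (if n = 0 ∧ k + 1 < lst.length then some [0, lst.getD (k+1) 0] else ans)
         else if PySem.Int.mod n (lst.getD k 0) = 0 ∧
                  PySem.Int.floordiv n (lst.getD k 0) ∈ seen then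
           some [lst.getD k 0, PySem.Int.floordiv n (lst.getD k 0)]
         else ans) = (pairHit lst n k).or ans := by
      unfold pairHit
      by_cases hx : lst.getD k 0 = 0
      · rw [if_pos hx, if_pos hx]
        by_cases hc : n = 0 ∧ k + 1 < lst.length
        · rw [if_pos hc, if_pos hc]; rfl
        · rw [if_neg hc, if_neg hc]; rfl
      · rw [if_neg hx, if_neg hx]
        by_cases hm : PySem.Int.mod n (lst.getD k 0) = 0 ∧
            PySem.Int.floordiv n (lst.getD k 0) ∈ seen
        · rw [if_pos hm, if_pos ⟨hm.1, (hseen _).mp hm.2⟩]; rfl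
        · rw [if_neg hm, if_neg (fun h => hm ⟨h.1, (hseen _).mpr h.2⟩)]; rfl
    have hseen' : ∀ v : Int, v ∈ PySem.Set.add seen (lst.getD k 0) ↔ v ∈ lst.drop k := by
      intro v
      rw [PySem.Set.mem_add, hdrop, hget, List.mem_cons, hseen v]
      tauto
    rw [hrev]
    simp only [simplePairAltLoop]
    rw [hans', ih (by omega) _ _ hseen']
    cases h1 : (List.range k).findSome? (pairHit lst n) with
    | some r => simp [List.range_succ, List.findSome?_append, h1]
    | none =>
      cases h2 : pairHit lst n k <;>
        simp [List.range_succ, List.findSome?_append, h1, h2]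

-- ===== VERDICT (by name: the statement is the Claim_ definition above) =====
theorem simple_pair_spec : Claim_equal_simple_pair := by
  intro lst n _
  unfold Spec_simple_pair
  unfold simple_pair simple_pair_alt
  have hA := outer_char lst n 0 (Nat.zero_le _)
  simp only [List.drop_zero, Nat.sub_zero] at hA
  rw [hA, ← List.range_eq_range']
  have hB := alt_loop_char lst n lst.length le_rfl PySem.Set.empty none
    (by intro v; simp [PySem.Set.empty, List.drop_length])
  rw [hB, Option.or_none]
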